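-- pv_equiv track=rewrite | github.com/griffinbholt/crossref | crossref/metrics/statistical.py | _lz_set
-- ===== SOURCE A (Python) =====
-- def _lz_set(text: str) -> frozenset:
--     """LZ77-style incremental parsing into a frozenset of phrases."""
--     phrases = set()
--     seen = {''}
--     current = ''
--     for char in text:
--         nxt = current + char
--         if nxt in seen:
--             current = nxt
--         else:
--             phrases.add(nxt)
--             seen.add(nxt)
--             current = ''
--     if current:
--         phrases.add(current)
--     return frozenset(phrases)
-- ===== SOURCE B (Python) =====
-- def _lz_set(text: str) -> frozenset:
--     """LZ78 incremental parse via a trie kept as a flat edge dict (node, char) -> node."""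
--     edges = {}
--     cur = 0
--     start = 0
--     phrases = []
--     for i, ch in enumerate(text):
--         nid = edges.get((cur, ch))
--         if nid is not None:
--             cur = nid
--         else:
--             edges[(cur, ch)] = len(edges) + 1
--             phrases.append(text[start:i + 1])
--             cur = 0
--             start = i + 1
--     if cur:
--         phrases.append(text[start:])
--     return frozenset(phrases)
-- ===== Notes on version B (the rewrite author's own statement) =====
-- stated objective: alternative
-- what changed: A grows the current phrase as a string and hashes the whole phrase against a seen-set at every character; B walks an LZ78 trie stored as a flat dict (node, char) -> node, doing constant work per character independent of phrase length, and reconstructs each phrase once by slicing the input.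
import Mathlib
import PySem

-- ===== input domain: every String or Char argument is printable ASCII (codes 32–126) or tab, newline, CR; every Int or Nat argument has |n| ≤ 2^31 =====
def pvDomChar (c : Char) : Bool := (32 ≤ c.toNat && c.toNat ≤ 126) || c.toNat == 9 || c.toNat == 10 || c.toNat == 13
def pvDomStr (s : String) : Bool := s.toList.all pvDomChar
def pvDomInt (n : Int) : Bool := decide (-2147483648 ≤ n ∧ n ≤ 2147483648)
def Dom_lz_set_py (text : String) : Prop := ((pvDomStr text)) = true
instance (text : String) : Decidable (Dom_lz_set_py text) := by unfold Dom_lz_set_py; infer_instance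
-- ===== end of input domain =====

-- B replaces A's per-character phrase string building and hash-set membership tests by an LZ78
-- trie kept as a flat edge dictionary (node, char) → node, with constant work per character
-- independent of phrase length, reconstructing each phrase once by slicing the input
-- (objective: alternative algorithm, same measured cost; neither mutates its argument).

-- ===== PORT A =====
-- one iteration of A's `for char in text` loop over the state (phrases, seen, current)
def lzAStep (st : List (List Char) × List (List Char) × List Char) (ch : Char) :
    List (List Char) × List (List Char) × List Char :=
  let nxt := st.2.2 ++ [ch]
  if PySem.Set.contains st.2.1 nxt then (st.1, st.2.1, nxt)
  else (PySem.Set.add st.1 nxt, PySem.Set.add st.2.1 nxt, [])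

def lz_set_py (text : String) : List String :=
  let st := text.toList.foldl lzAStep (PySem.Set.empty, PySem.Set.ofList [[]], ([] : List Char))
  let phrases := if st.2.2 ≠ [] then PySem.Set.add st.1 st.2.2 else st.1
  phrases.map String.ofList

-- ===== PORT B =====
-- one iteration of B's `for i, ch in enumerate(text)` loop over the state (edges, cur, start, phrases)
def lzBStep (cs : List Char) (st : PySem.Dict (Nat × Char) Nat × Nat × Int × List (List Char))
    (p : Int × Char) : PySem.Dict (Nat × Char) Nat × Nat × Int × List (List Char) :=
  match st.1.get? (st.2.1, p.2) with
  | some nid => (st.1, nid, st.2.2.1, st.2.2.2)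
  | none => (st.1.insert (st.2.1, p.2) (st.1.size + 1), 0, p.1 + 1,
             st.2.2.2 ++ [PySem.List.slice cs (some st.2.2.1) (some (p.1 + 1))])

def lz_set_py_alt (text : String) : List String :=
  let cs := text.toList
  let st := (PySem.List.enumerate cs).foldl (lzBStep cs) (PySem.Dict.empty, 0, 0, [])
  let phrases := if st.2.1 ≠ 0 then st.2.2.2 ++ [PySem.List.slice cs (some st.2.2.1) none]
                 else st.2.2.2
  (PySem.Set.ofList phrases).map String.ofList

-- ===== PRECONDITION & SPEC =====
def Spec_lz_set_py (text : String) (out : List String) : Prop := out = lz_set_py_alt text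
instance (text : String) (out : List String) : Decidable (Spec_lz_set_py text out) := by unfold Spec_lz_set_py; infer_instance

-- ===== CLAIM (what is proved, stated in full; the proofs are below) =====
def Claim_equal_lz_set_py : Prop := ∀ (text : String), Dom_lz_set_py text → Spec_lz_set_py text (lz_set_py text)

-- ===== LEMMAS AND PROOFS =====

-- The coupled loop invariant: `L` is A's `seen` (nodup, root '' at index 0, parent-closed),
-- B's edge dictionary holds exactly the parent/child pairs of `L`, B's node `cur` is the index
-- of A's `current` in `L`, and A's `current` is the slice of the text from B's `start`.
lemma lz_loop_rel (cs : List Char) :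
    ∀ (suffix : List Char) (i : Nat) (ph L : List (List Char)) (cur : Nat) (start : Int)
      (edges : PySem.Dict (Nat × Char) Nat),
    cs.drop i = suffix → i ≤ cs.length →
    L.Nodup → ph.Nodup → L[0]? = some ([] : List Char) →
    (∀ x ∈ ph, x ∈ L) →
    0 ≤ start → start.toNat ≤ i →
    L[cur]? = some ((cs.drop start.toNat).take (i - start.toNat)) →
    edges.size + 1 = L.length →
    (∀ p c k, edges.get? (p, c) = some k ↔ ∃ sp, L[p]? = some sp ∧ L[k]? = some (sp ++ [c])) →
    (∀ s ∈ L, s ≠ [] → ∃ sp c, s = sp ++ [c] ∧ sp ∈ L) →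
    (let a := suffix.foldl lzAStep (ph, L, (cs.drop start.toNat).take (i - start.toNat));
     let b := (PySem.List.enumerate suffix (i : Int)).foldl (lzBStep cs) (edges, cur, start, ph);
     a.1 = b.2.2.2 ∧ a.1.Nodup ∧ 0 ≤ b.2.2.1 ∧
       a.2.2 = cs.drop b.2.2.1.toNat ∧ (a.2.2 = [] ↔ b.2.1 = 0)) := by
  intro suffix
  induction suffix with
  | nil =>
    intro i ph L cur start edges hdrop hi hL hph h0 hsub hs0 hsi hcur hsz hedge hpar
    have hil : i = cs.length := le_antisymm hi (List.drop_eq_nil_iff.mp hdrop)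
    subst hil
    have hcl : cur < L.length := (List.getElem?_eq_some_iff.mp hcur).1
    have hc : (cs.drop start.toNat).take (cs.length - start.toNat) = cs.drop start.toNat :=
      List.take_of_length_le (by simp)
    refine ⟨rfl, hph, hs0, hc, ?_, ?_⟩
    · intro hnil
      have hnil' : (cs.drop start.toNat).take (cs.length - start.toNat) = [] := hnil
      exact List.getElem?_inj hcl hL
        (show L[cur]? = L[0]? by rw [hcur, h0, hnil'])
    · intro h
      have h' : cur = 0 := h
      rw [h', h0] at hcur
      show (cs.drop start.toNat).take (cs.length - start.toNat) = []
      exact (Option.some.inj hcur).symm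
  | cons ch rest ih =>
    intro i ph L cur start edges hdrop hi hL hph h0 hsub hs0 hsi hcur hsz hedge hpar
    -- decompose the drop
    have hilt : i < cs.length := by
      by_contra hcon
      rw [List.drop_eq_nil_iff.mpr (by omega)] at hdrop
      simp at hdrop
    have hdi : cs.drop i = cs[i] :: cs.drop (i + 1) := List.drop_eq_getElem_cons hilt
    rw [hdrop] at hdi
    injection hdi with hch hrest'
    have hrest : cs.drop (i + 1) = rest := hrest'.symm
    set s := start.toNat with hs
    set c := (cs.drop s).take (i - s) with hcdef
    have hnxt : c ++ [ch] = (cs.drop s).take (i + 1 - s) := by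
      have h1 : i + 1 - s = (i - s) + 1 := by omega
      have h2 : s + (i - s) = i := by omega
      rw [h1, List.take_add_one, List.getElem?_drop, h2, List.getElem?_eq_getElem hilt, ← hch]
      simp [hcdef]
    have hcl : cur < L.length := (List.getElem?_eq_some_iff.mp hcur).1
    rw [List.foldl_cons, PySem.List.enumerate_cons, List.foldl_cons]
    rcases hget : edges.get? (cur, ch) with _ | nid
    · -- new phrase: nxt not seen
      have hnmem : c ++ [ch] ∉ L := by
        intro hmem
        obtain ⟨k, hk⟩ := List.mem_iff_getElem?.mp hmem
        have : edges.get? (cur, ch) = some k := (hedge cur ch k).mpr ⟨c, hcur, hk⟩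
        simp [hget] at this
      have hnph : c ++ [ch] ∉ ph := fun hm => hnmem (hsub _ hm)
      have hA : lzAStep (ph, L, c) ch = (ph ++ [c ++ [ch]], L ++ [c ++ [ch]], []) := by
        have hcont : PySem.Set.contains L (c ++ [ch]) = false := by
          rcases hb : PySem.Set.contains L (c ++ [ch]) with _ | _
          · rfl
          · exact absurd ((PySem.Set.contains_iff L _).mp hb) hnmem
        simp only [lzAStep, hcont, Bool.false_eq_true, if_false,
          PySem.Set.add_of_not_mem hnmem, PySem.Set.add_of_not_mem hnph]
      have hB : lzBStep cs (edges, cur, start, ph) ((i : Int), ch)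
          = (edges.insert (cur, ch) (edges.size + 1), 0, (i : Int) + 1,
             ph ++ [c ++ [ch]]) := by
        have hslice : PySem.List.slice cs (some start) (some ((i : Int) + 1)) = c ++ [ch] := by
          have h3 : ((i : Int) + 1).toNat = i + 1 := by omega
          rw [PySem.List.slice_toNat cs hs0 (by omega), h3, hnxt]
        simp [lzBStep, hget, hslice]
      rw [hA, hB]
      have hc_mem : c ∈ L := List.mem_of_getElem? hcur
      have hL0 : 0 < L.length := by omega
      have hL' : (L ++ [c ++ [ch]]).Nodup := by
        simpa using List.Nodup.concat hnmem hL
      have hcontf : edges.contains (cur, ch) = false := by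
        rw [PySem.Dict.contains_eq_isSome_get?, hget]; rfl
      have := ih (i + 1) (ph ++ [c ++ [ch]]) (L ++ [c ++ [ch]]) 0 ((i : Int) + 1)
        (edges.insert (cur, ch) (edges.size + 1))
        hrest (by omega) hL'
        (by simpa using List.Nodup.concat hnph hph)
        (by rw [List.getElem?_append_left hL0]; exact h0)
        (by intro x hx
            rcases List.mem_append.mp hx with hx | hx
            · exact List.mem_append.mpr (Or.inl (hsub _ hx))
            · exact List.mem_append.mpr (Or.inr hx))
        (by omega) (by omega)
        (by rw [List.getElem?_append_left hL0, h0]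
            congr 1
            have : ((i : Int) + 1).toNat = i + 1 := by omega
            simp [this])
        (by rw [PySem.Dict.size_insert, hcontf, if_neg (by simp)]
            simp [hsz])
        ?_ ?_
      · -- pass conclusion through
        have harg : ((cs.drop ((i : Int) + 1).toNat).take ((i + 1) - ((i : Int) + 1).toNat))
            = ([] : List Char) := by
          have : ((i : Int) + 1).toNat = i + 1 := by omega
          simp [this]
        rw [harg] at this
        exact this
      · -- edge characterization for the extended trie
        intro p c' k
        rw [PySem.Dict.get?_insert]
        by_cases hkey : (p, c') = (cur, ch)
        · rw [if_pos hkey]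
          rw [Prod.mk.injEq] at hkey
          obtain ⟨hp, hc'⟩ := hkey
          subst hp; subst hc'
          constructor
          · intro hk
            have hk' : k = L.length := by
              have := Option.some.inj hk
              omega
            subst hk'
            exact ⟨c, by rw [List.getElem?_append_left hcl]; exact hcur,
                   List.getElem?_concat_length⟩
          · rintro ⟨sp, hsp, hk⟩
            rw [List.getElem?_append_left hcl, hcur] at hsp
            have hspc : sp = c := (Option.some.inj hsp).symm
            subst hspc
            by_cases hkl : k < L.length
            · rw [List.getElem?_append_left hkl] at hk
              exact absurd (List.mem_of_getElem? hk) hnmem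
            · have hklen : k < L.length + 1 := by
                have := (List.getElem?_eq_some_iff.mp hk).1
                simpa using this
              have : k = L.length := by omega
              rw [this, ← hsz]
        · rw [if_neg hkey]
          rw [hedge p c' k]
          constructor
          · rintro ⟨sp, hsp, hk⟩
            refine ⟨sp, ?_, ?_⟩
            · rw [List.getElem?_append_left (List.getElem?_eq_some_iff.mp hsp).1]; exact hsp
            · rw [List.getElem?_append_left (List.getElem?_eq_some_iff.mp hk).1]; exact hk
          · rintro ⟨sp, hsp, hk⟩
            have hplen : p < L.length + 1 := by simpa using (List.getElem?_eq_some_iff.mp hsp).1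
            have hklen : k < L.length + 1 := by simpa using (List.getElem?_eq_some_iff.mp hk).1
            by_cases hpl : p < L.length
            · rw [List.getElem?_append_left hpl] at hsp
              by_cases hkl : k < L.length
              · rw [List.getElem?_append_left hkl] at hk
                exact ⟨sp, hsp, hk⟩
              · -- k = L.length: the new node; forces (p, c') = (cur, ch)
                have hkeq : k = L.length := by omega
                subst hkeq
                rw [List.getElem?_concat_length] at hk
                have hspc : sp ++ [c'] = c ++ [ch] := (Option.some.inj hk).symm
                have h2 : sp = c ∧ c' = ch := by
                  simpa using List.concat_inj.mp (by simpa [List.concat] using hspc)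
                exfalso
                apply hkey
                have hpcur : p = cur :=
                  List.getElem?_inj hpl hL (by rw [hsp, hcur, h2.1])
                rw [hpcur, h2.2]
            · -- p = L.length: sp is the new phrase, its child cannot exist
              have hpeq : p = L.length := by omega
              subst hpeq
              rw [List.getElem?_concat_length] at hsp
              have hspc : sp = c ++ [ch] := (Option.some.inj hsp).symm
              subst hspc
              exfalso
              by_cases hkl : k < L.length
              · rw [List.getElem?_append_left hkl] at hk
                obtain ⟨sp₂, c₂, heq, hsp₂⟩ := hpar _ (List.mem_of_getElem? hk) (by simp)
                have h2 : c ++ [ch] = sp₂ ∧ c' = c₂ := by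
                  simpa using List.concat_inj.mp (by simpa [List.concat] using heq)
                exact hnmem (h2.1 ▸ hsp₂)
              · have : k = L.length := by omega
                subst this
                rw [List.getElem?_concat_length] at hk
                have : (c ++ [ch]) ++ [c'] = c ++ [ch] := (Option.some.inj hk).symm
                simpa using congrArg List.length this
      · -- parent-closure for the extended seen set
        intro s' hs' hne
        rcases List.mem_append.mp hs' with hs' | hs'
        · obtain ⟨sp, c₂, heq, hsp⟩ := hpar _ hs' hne
          exact ⟨sp, c₂, heq, List.mem_append.mpr (Or.inl hsp)⟩
        · have : s' = c ++ [ch] := by simpa using hs'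
          exact ⟨c, ch, this, List.mem_append.mpr (Or.inl hc_mem)⟩
    · -- known phrase: follow the edge
      obtain ⟨sp, hsp, hnid⟩ := (hedge cur ch nid).mp hget
      rw [hcur] at hsp
      have hspc : sp = c := (Option.some.inj hsp).symm
      subst hspc
      have hmem : c ++ [ch] ∈ L := List.mem_of_getElem? hnid
      have hA : lzAStep (ph, L, c) ch = (ph, L, c ++ [ch]) := by
        simp [lzAStep, hmem]
      have hB : lzBStep cs (edges, cur, start, ph) ((i : Int), ch) = (edges, nid, start, ph) := by
        simp [lzBStep, hget]
      rw [hA, hB]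
      have := ih (i + 1) ph L nid start edges hrest (by omega) hL hph h0 hsub hs0 (by omega)
        (by rw [hnid, ← hnxt]) hsz hedge hpar
      rw [← hnxt] at this
      exact this

theorem lz_main (text : String) : lz_set_py text = lz_set_py_alt text := by
  have h := lz_loop_rel text.toList text.toList 0 [] [[]] 0 0 PySem.Dict.empty
    rfl (by omega) (by simp) (by simp) rfl (by simp) le_rfl (by simp)
    (by simp) (by simp)
    (by intro p c k
        constructor
        · intro hcon
          simp [PySem.Dict.get?_empty] at hcon
        · rintro ⟨sp, hsp, hk⟩
          rcases k with _ | k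
          · simp at hk
          · simp at hk)
    (by intro s' hs' hne
        simp at hs'
        exact absurd hs' hne)
  simp only at h
  obtain ⟨h1, h2, h3, h4, h5⟩ := h
  simp only [lz_set_py, lz_set_py_alt]
  set a := text.toList.foldl lzAStep (PySem.Set.empty, PySem.Set.ofList [[]], ([] : List Char)) with ha
  set b := (PySem.List.enumerate text.toList).foldl (lzBStep text.toList)
    (PySem.Dict.empty, 0, 0, []) with hb
  have h1' : a.1 = b.2.2.2 := h1
  have h2' : a.1.Nodup := h2
  have h3' : 0 ≤ b.2.2.1 := h3
  have h4' : a.2.2 = text.toList.drop b.2.2.1.toNat := h4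
  have h5' : a.2.2 = [] ↔ b.2.1 = 0 := h5
  by_cases hc : a.2.2 = []
  · rw [if_neg (by simpa using hc), if_neg (by simpa using h5'.mp hc)]
    rw [h1', PySem.Set.ofList_eq_self_of_nodup _ (h1' ▸ h2')]
  · have hb0 : b.2.1 ≠ 0 := fun h => hc (h5'.mpr h)
    rw [if_pos hc, if_pos hb0, PySem.List.slice_from _ h3', ← h4', ← h1',
      PySem.Set.ofList_append_singleton, PySem.Set.ofList_eq_self_of_nodup _ h2']

-- ===== VERDICT (by name: the statement is the Claim_ definition above) =====
theorem lz_set_py_spec : Claim_equal_lz_set_py := by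
  intro text _
  exact lz_main text
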